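-- pv_equiv track=rewrite | github.com/Tirth9000/1-80_Python_Practice | 41-50_Program/Day49.py | sort_word
-- ===== SOURCE A (Python) =====
-- def sort_word(string):
--     seperated_string = string.split()
--     single_string = ''
--     non_repeat = []
--
--     for words in seperated_string:
--         for letter in words:
--             if letter in non_repeat:
--                 continue
--             else:
--                 non_repeat.append(letter)
--
--     non_repeat.sort()
--
--     for letter in non_repeat:
--         single_string += letter
--
--     comma_string = ','.join(letter for letter in single_string)
--
--     return [comma_string]
-- ===== SOURCE B (Python) =====
-- def sort_word(string):
--     chars = sorted(c for w in string.split() for c in w)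
--     result = []
--     for c in chars:
--         if not result or result[-1] != c:
--             result.append(c)
--     return [','.join(result)]
-- ===== Notes on version B (the rewrite author's own statement) =====
-- stated objective: alternative
-- what changed: Instead of building a first-occurrence unique list with a membership scan per character and sorting it, B collects all characters, sorts once, and removes adjacent duplicates in a single pass.
import Mathlib
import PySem

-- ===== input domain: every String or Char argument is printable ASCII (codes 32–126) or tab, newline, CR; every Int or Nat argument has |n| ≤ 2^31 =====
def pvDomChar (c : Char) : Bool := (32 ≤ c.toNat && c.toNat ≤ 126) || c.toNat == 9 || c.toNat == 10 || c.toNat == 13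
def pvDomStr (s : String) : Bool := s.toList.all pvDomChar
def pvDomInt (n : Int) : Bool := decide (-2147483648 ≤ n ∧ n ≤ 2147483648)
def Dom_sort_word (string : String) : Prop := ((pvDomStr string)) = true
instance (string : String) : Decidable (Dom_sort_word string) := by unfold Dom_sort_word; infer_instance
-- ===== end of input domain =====

-- B collects all characters of the split words, sorts once, and removes adjacent duplicates
-- in a single pass, instead of A's per-character membership scan followed by a sort (alternative decomposition).


-- ===== PORT A =====
def sort_word (string : String) : List String :=
  let seperated_string := PySem.Str.split₀ string
  let non_repeat : List Char :=
    seperated_string.foldl (fun non_repeat words =>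
      words.toList.foldl (fun non_repeat letter =>
        if non_repeat.contains letter then non_repeat else non_repeat ++ [letter]) non_repeat) []
  let non_repeat := PySem.List.sorted non_repeat (fun x => x) false
  let single_string : List Char :=
    non_repeat.foldl (fun single_string letter => single_string ++ [letter]) []
  [String.ofList (PySem.Chars.join [','] (single_string.map (fun letter => [letter])))]

-- ===== PORT B =====
def sort_word_alt (string : String) : List String :=
  let chars :=
    PySem.List.sorted ((PySem.Str.split₀ string).flatMap String.toList) (fun x => x) false
  let result : List Char :=
    chars.foldl (fun result c =>
      if result.getLast? = some c then result else result ++ [c]) []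
  [String.ofList (PySem.Chars.join [','] (result.map (fun c => [c])))]

-- ===== PRECONDITION & SPEC =====
def Spec_sort_word (string : String) (out : List String) : Prop := out = sort_word_alt string
instance (string : String) (out : List String) : Decidable (Spec_sort_word string out) := by unfold Spec_sort_word; infer_instance

-- ===== CLAIM (what is proved, stated in full; the proofs are below) =====
def Claim_equal_sort_word : Prop := ∀ (string : String), Dom_sort_word string → Spec_sort_word string (sort_word string)

-- ===== LEMMAS AND PROOFS =====

-- A's nested per-word loop is set(…) accumulation over the flattened character list
theorem foldl_words_eq_flatMap (L : List String) (acc : List Char) :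
    L.foldl (fun a w => w.toList.foldl (fun a c =>
        if a.contains c then a else a ++ [c]) a) acc
      = (L.flatMap String.toList).foldl (fun a c =>
        if a.contains c then a else a ++ [c]) acc := by
  induction L generalizing acc with
  | nil => rfl
  | cons w L ih =>
    rw [List.foldl_cons, List.flatMap_cons, List.foldl_append]
    exact ih _

theorem foldl_add_eq_ofList (cs : List Char) :
    cs.foldl (fun a c => if a.contains c then a else a ++ [c]) []
      = PySem.Set.ofList cs := by
  rw [PySem.Set.ofList_eq_foldl]
  rfl

-- collecting characters one by one is the identity
theorem foldl_snoc (cs acc : List Char) :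
    cs.foldl (fun a c => a ++ [c]) acc = acc ++ cs := by
  induction cs generalizing acc with
  | nil => simp
  | cons c cs ih => simp [ih]

-- every element of a (· ≤ ·)-pairwise list is ≤ its last element
theorem le_getLast?_of_pairwise (l : List Char) (h : l.Pairwise (· ≤ ·)) :
    ∀ a ∈ l, ∃ b, l.getLast? = some b ∧ a ≤ b := by
  induction l with
  | nil => intro a ha; cases ha
  | cons x l ih =>
    intro a ha
    cases l with
    | nil =>
      simp at ha
      exact ⟨x, by simp [ha]⟩
    | cons y t =>
      rcases List.mem_cons.mp ha with rfl | hmem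
      · obtain ⟨b, hb, hyb⟩ := ih h.tail y (List.mem_cons_self ..)
        exact ⟨b, by simpa [List.getLast?_cons_cons] using hb,
          le_trans (List.rel_of_pairwise_cons h (List.mem_cons_self ..)) hyb⟩
      · obtain ⟨b, hb, hab⟩ := ih h.tail a hmem
        exact ⟨b, by simpa [List.getLast?_cons_cons] using hb, hab⟩

-- the adjacent-dedup fold: invariant
theorem dedupFold_spec (l : List Char) : ∀ (acc : List Char),
    acc.Pairwise (· < ·) → l.Pairwise (· ≤ ·) →
    (∀ a ∈ acc, ∀ c ∈ l, a ≤ c) →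
    (l.foldl (fun r c => if r.getLast? = some c then r else r ++ [c]) acc).Pairwise (· < ·)
    ∧ ∀ x, x ∈ l.foldl (fun r c => if r.getLast? = some c then r else r ++ [c]) acc
        ↔ x ∈ acc ∨ x ∈ l := by
  induction l with
  | nil => intro acc h1 _ _; exact ⟨h1, by simp⟩
  | cons c l ih =>
    intro acc h1 h2 h3
    by_cases hc : acc.getLast? = some c
    · have hcacc : c ∈ acc := List.mem_of_getLast? hc
      have := ih acc h1 h2.tail
        (fun a ha x hx => h3 a ha x (List.mem_cons_of_mem _ hx))
      refine ⟨by simpa [hc] using this.1, fun x => ?_⟩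
      have hm := this.2 x
      simp only [List.foldl_cons, if_pos hc]
      rw [hm]
      constructor
      · rintro (h | h)
        · exact Or.inl h
        · exact Or.inr (List.mem_cons_of_mem _ h)
      · rintro (h | h)
        · exact Or.inl h
        · rcases List.mem_cons.mp h with rfl | h
          · exact Or.inl hcacc
          · exact Or.inr h
    · -- append c
      have hlt : ∀ a ∈ acc, a < c := by
        intro a ha
        obtain ⟨b, hb, hab⟩ := le_getLast?_of_pairwise acc (h1.imp le_of_lt) a ha
        have hbc : b ≤ c := h3 b (List.mem_of_getLast? hb) c (List.mem_cons_self ..)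
        have hbne : b ≠ c := fun h => hc (h ▸ hb)
        exact lt_of_le_of_lt hab (lt_of_le_of_ne hbc hbne)
      have h1' : (acc ++ [c]).Pairwise (· < ·) := by
        rw [List.pairwise_append]
        exact ⟨h1, by simp, by simpa using hlt⟩
      have h3' : ∀ a ∈ acc ++ [c], ∀ x ∈ l, a ≤ x := by
        intro a ha x hx
        rcases List.mem_append.mp ha with ha | ha
        · exact h3 a ha x (List.mem_cons_of_mem _ hx)
        · simp at ha
          exact ha ▸ List.rel_of_pairwise_cons h2 hx
      have := ih (acc ++ [c]) h1' h2.tail h3'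
      refine ⟨by simpa [hc] using this.1, fun x => ?_⟩
      simp only [List.foldl_cons, if_neg hc]
      rw [this.2 x]
      simp [or_assoc, List.mem_cons]

theorem sort_word_spec_aux (string : String) :
    sort_word string = sort_word_alt string := by
  unfold sort_word sort_word_alt
  simp only []
  set C := (PySem.Str.split₀ string).flatMap String.toList with hC
  set S := PySem.List.sorted C (fun x => x) false with hS
  have hSp : S.Pairwise (· ≤ ·) := by
    simpa using PySem.List.sorted_pairwise C (fun x => x)
  have hded := dedupFold_spec S [] List.Pairwise.nil hSp (by simp)
  set R := S.foldl (fun r c => if r.getLast? = some c then r else r ++ [c]) [] with hR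
  have hRnd : R.Nodup := hded.1.imp ne_of_lt
  have hmemR : ∀ x, x ∈ R ↔ x ∈ C := by
    intro x
    rw [hded.2 x]
    simp [hS, PySem.List.mem_sorted]
  -- A's accumulation is Set.ofList C
  rw [foldl_words_eq_flatMap, foldl_add_eq_ofList]
  -- its sorted form is exactly R
  have hperm : R.Perm (PySem.Set.ofList C) := by
    rw [List.perm_ext_iff_of_nodup hRnd (PySem.Set.nodup_ofList C)]
    intro a
    rw [hmemR a, PySem.Set.mem_ofList]
  have hsorted : PySem.List.sorted (PySem.Set.ofList C) (fun x => x) false = R :=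
    PySem.List.sorted_eq_of_perm_of_pairwise_lt (PySem.Set.ofList C) R (fun x => x)
      hperm (by simpa using hded.1)
  rw [hsorted, foldl_snoc]
  simp

-- ===== VERDICT (by name: the statement is the Claim_ definition above) =====
theorem sort_word_spec : Claim_equal_sort_word := by
  intro string _
  exact sort_word_spec_aux string
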